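-- pv_equiv track=rewrite | github.com/SamRakaba/SynthForge.AI | test_json_cleanup.py | fix_control_chars
-- ===== SOURCE A (Python) =====
-- def fix_control_chars(text):
--     result = []
--     in_string = False
--     escape_next = False
--
--     for char in text:
--         if escape_next:
--             result.append(char)
--             escape_next = False
--             continue
--
--         if char == '\\':
--             result.append(char)
--             escape_next = True
--             continue
--
--         if char == '"':
--             in_string = not in_string
--             result.append(char)
--             continue
--
--         # Replace ALL control chars inside strings with spaces
--         if in_string:
--             if ord(char) < 32:  # Control character
--                 result.append(' ')
--             else:
--                 result.append(char)
--         else: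
--             result.append(char)
--
--     return ''.join(result)
-- ===== SOURCE B (Python) =====
-- def fix_control_chars(text):
--     # Staged pipeline instead of a carried-flag state machine.
--     # Pass 1: tokenize into backslash-escape pairs and single characters.
--     tokens = []
--     i = 0
--     while i < len(text):
--         if text[i] == '\\':
--             tokens.append(text[i:i + 2])
--             i += 2
--         else:
--             tokens.append(text[i])
--             i += 1
--     # Pass 2: number of (unescaped) quote tokens strictly before each token.
--     counts = []
--     q = 0
--     for t in tokens:
--         counts.append(q)
--         if t == '"':
--             q += 1
--     # Pass 3: a single-char token inside a string (odd quote count) that is a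
--     # control character becomes a space; everything else is kept verbatim.
--     return ''.join(' ' if (c % 2 == 1 and len(t) == 1 and ord(t) < 32) else t
--                    for t, c in zip(tokens, counts))
-- ===== Notes on version B (the rewrite author's own statement) =====
-- stated objective: alternative
-- what changed: Replaced the single-pass state machine carrying in_string/escape_next flags by a three-stage pipeline: tokenize into escape-pairs and single chars, compute a prefix list of quote counts, then map each token by quote parity and join.
import Mathlib
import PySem

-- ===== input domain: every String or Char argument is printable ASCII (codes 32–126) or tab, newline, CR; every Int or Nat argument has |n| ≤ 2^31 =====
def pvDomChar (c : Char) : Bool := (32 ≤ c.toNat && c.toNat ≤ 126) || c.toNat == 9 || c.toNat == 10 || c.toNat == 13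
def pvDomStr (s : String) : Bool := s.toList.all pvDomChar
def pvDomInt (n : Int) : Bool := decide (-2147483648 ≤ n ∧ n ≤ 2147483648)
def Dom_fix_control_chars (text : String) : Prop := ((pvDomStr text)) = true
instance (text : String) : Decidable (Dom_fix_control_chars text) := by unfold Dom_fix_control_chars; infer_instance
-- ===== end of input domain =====

-- B replaces A's flag-carrying single-pass state machine by a staged pipeline
-- (tokenize, prefix quote counts, parity-based map); same cost, different structure.

-- ===== PORT A =====
-- A's loop state: (result, in_string, escape_next); one step per character.
def fixA_step (st : List Char × Bool × Bool) (c : Char) : List Char × Bool × Bool :=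
  let res := st.1; let inS := st.2.1; let esc := st.2.2
  if esc then (res ++ [c], inS, false)
  else if c = '\\' then (res ++ [c], inS, true)
  else if c = '"' then (res ++ [c], !inS, false)
  else if inS then
    (if c.toNat < 32 then (res ++ [' '], inS, false) else (res ++ [c], inS, false))
  else (res ++ [c], inS, false)

def fix_control_chars (text : String) : String :=
  String.ofList (text.toList.foldl fixA_step ([], false, false)).1

-- ===== PORT B =====
-- Pass 1 of Source B: tokenize into backslash-escape pairs and single characters.
def pvTokenize : List Char → List (List Char)
  | [] => []
  | c :: rest =>
    if c = '\\' then
      match rest with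
      | [] => [[c]]
      | d :: r => [c, d] :: pvTokenize r
    else [c] :: pvTokenize rest

-- Pass 2 of Source B: counts.append(q); if t == '"': q += 1  (as a fold over tokens).
def pvParStep (st : List Nat × Nat) (t : List Char) : List Nat × Nat :=
  (st.1 ++ [st.2], if t = ['"'] then st.2 + 1 else st.2)

def pvCounts (q : Nat) (ts : List (List Char)) : List Nat :=
  (ts.foldl pvParStep ([], q)).1

-- Pass 3 of Source B: ' ' if (c % 2 == 1 and len(t) == 1 and ord(t) < 32) else t.
def pvRend (t : List Char) (c : Nat) : List Char :=
  if c % 2 = 1 ∧ t.length = 1 ∧ (t.headD ' ').toNat < 32 then [' '] else t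

def fix_control_chars_alt (text : String) : String :=
  let ts := pvTokenize text.toList
  String.ofList (((ts.zip (pvCounts 0 ts)).map (fun tp => pvRend tp.1 tp.2)).flatten)

-- ===== PRECONDITION & SPEC =====
def Spec_fix_control_chars (text : String) (out : String) : Prop := out = fix_control_chars_alt text
instance (text : String) (out : String) : Decidable (Spec_fix_control_chars text out) := by unfold Spec_fix_control_chars; infer_instance

-- ===== CLAIM (what is proved, stated in full; the proofs are below) =====
def Claim_equal_fix_control_chars : Prop := ∀ (text : String), Dom_fix_control_chars text → Spec_fix_control_chars text (fix_control_chars text)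

-- ===== LEMMAS AND PROOFS =====
-- B's three passes, fused over a token list with starting quote count q.
def pvPipe (q : Nat) (ts : List (List Char)) : List Char :=
  ((ts.zip (pvCounts q ts)).map (fun tp => pvRend tp.1 tp.2)).flatten

theorem pvCounts_acc (ts : List (List Char)) :
    ∀ (acc : List Nat) (q : Nat),
      (ts.foldl pvParStep (acc, q)).1 = acc ++ (ts.foldl pvParStep ([], q)).1 := by
  induction ts with
  | nil => intro acc q; simp
  | cons t ts ih =>
    intro acc q
    simp only [List.foldl, pvParStep]
    rw [ih, ih ([] ++ [q])]
    simp

theorem pvCounts_cons (q : Nat) (t : List Char) (ts : List (List Char)) :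
    pvCounts q (t :: ts) = q :: pvCounts (if t = ['"'] then q + 1 else q) ts := by
  unfold pvCounts
  simp only [List.foldl, pvParStep]
  rw [pvCounts_acc]
  simp

theorem pvPipe_cons (q : Nat) (t : List Char) (ts : List (List Char)) :
    pvPipe q (t :: ts) = pvRend t q ++ pvPipe (if t = ['"'] then q + 1 else q) ts := by
  unfold pvPipe
  rw [pvCounts_cons]
  simp

theorem foldA_eq_pipe (l : List Char) :
    ∀ (q : Nat) (acc : List Char),
      (l.foldl fixA_step (acc, q % 2 == 1, false)).1 = acc ++ pvPipe q (pvTokenize l) := by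
  induction l using pvTokenize.induct with
  | case1 => intro q acc; simp [pvPipe, pvCounts, pvTokenize]
  | case2 =>
    intro q acc
    simp [List.foldl, fixA_step, pvTokenize, pvPipe, pvCounts, pvParStep, pvRend]
  | case3 d r ih =>
    intro q acc
    have htok : pvTokenize ('\\' :: d :: r) = ['\\', d] :: pvTokenize r := by
      simp [pvTokenize]
    rw [htok, pvPipe_cons]
    have ht : ¬ (['\\', d] = ['"']) := by simp
    rw [if_neg ht]
    have hr : pvRend ['\\', d] q = ['\\', d] := by simp [pvRend]
    rw [hr]
    show (List.foldl fixA_step (fixA_step (fixA_step (acc, q % 2 == 1, false) '\\') d) r).1 = _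
    rw [show fixA_step (fixA_step (acc, q % 2 == 1, false) '\\') d
          = (acc ++ ['\\'] ++ [d], q % 2 == 1, false) from by simp [fixA_step]]
    rw [ih q (acc ++ ['\\'] ++ [d])]
    simp
  | case4 c rest h ih =>
    intro q acc
    have htok : pvTokenize (c :: rest) = [c] :: pvTokenize rest := by
      rw [pvTokenize.eq_def]
      simp [h]
    rw [htok, pvPipe_cons]
    by_cases hq : c = '"'
    · subst hq
      have hpar : ((q + 1) % 2 == 1) = !(q % 2 == 1) := by
        rcases Nat.mod_two_eq_zero_or_one q with h1 | h1 <;> simp [Nat.add_mod, h1]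
      show (List.foldl fixA_step (fixA_step (acc, q % 2 == 1, false) '"') rest).1 = _
      rw [show fixA_step (acc, q % 2 == 1, false) '"'
            = (acc ++ ['"'], !(q % 2 == 1), false) from by simp [fixA_step]]
      rw [if_pos rfl, ← hpar, ih (q + 1) (acc ++ ['"'])]
      simp [pvRend]
    · have ht : ¬ ([c] = ['"']) := by simp [hq]
      rw [if_neg ht]
      show (List.foldl fixA_step (fixA_step (acc, q % 2 == 1, false) c) rest).1 = _
      by_cases hp : q % 2 = 1 <;> by_cases hc : c.toNat < 32 <;>
        · rw [show fixA_step (acc, q % 2 == 1, false) c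
                = (acc ++ [if (q % 2 = 1 ∧ c.toNat < 32) then ' ' else c], q % 2 == 1, false) from by
              simp [fixA_step, h, hq, hp, hc]]
          rw [ih q]
          simp [pvRend, hp, hc]

-- ===== VERDICT (by name: the statement is the Claim_ definition above) =====
theorem fix_control_chars_spec : Claim_equal_fix_control_chars := by
  intro text _
  unfold Spec_fix_control_chars fix_control_chars fix_control_chars_alt
  have := foldA_eq_pipe text.toList 0 []
  simp only [List.nil_append] at this
  rw [show (false : Bool) = (0 % 2 == 1) from rfl] at this ⊢
  rw [this]
  rfl
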